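-- pv_equiv track=rewrite | github.com/LostHerro/PyMimircache | test/testing/ml_2step.py | get_next_access_dist
-- ===== SOURCE A (Python) =====
-- from collections import deque
--
-- def get_next_access_dist(id_ser):
--
--     reverse_data = deque()
--     next_access_dist = []
--     next_access_time = {}
--
--     for req in id_ser:
--         reverse_data.appendleft(req)
--
--     for index, req in enumerate(reverse_data):
--         if req in next_access_time:
--             next_access_dist.append(index - next_access_time[req])
--         else:
--             next_access_dist.append(len(id_ser))
--         next_access_time[req] = index
--
--     next_access_dist.reverse()
--     return next_access_dist
-- ===== SOURCE B (Python) =====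
-- def get_next_access_dist(id_ser):
--     n = len(id_ser)
--     result = [n] * n
--     last = {}
--     i = 0
--     for req in id_ser:
--         if req in last:
--             j = last[req]
--             result[j] = i - j
--         last[req] = i
--         i += 1
--     return result
-- ===== Notes on version B (the rewrite author's own statement) =====
-- stated objective: simpler
-- what changed: Single forward pass that patches the previous occurrence's slot in a preallocated [n]*n list via a last-seen index dict, instead of building a reversed deque, scanning it while appending distances, and reversing the output list.
import Mathlib
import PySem

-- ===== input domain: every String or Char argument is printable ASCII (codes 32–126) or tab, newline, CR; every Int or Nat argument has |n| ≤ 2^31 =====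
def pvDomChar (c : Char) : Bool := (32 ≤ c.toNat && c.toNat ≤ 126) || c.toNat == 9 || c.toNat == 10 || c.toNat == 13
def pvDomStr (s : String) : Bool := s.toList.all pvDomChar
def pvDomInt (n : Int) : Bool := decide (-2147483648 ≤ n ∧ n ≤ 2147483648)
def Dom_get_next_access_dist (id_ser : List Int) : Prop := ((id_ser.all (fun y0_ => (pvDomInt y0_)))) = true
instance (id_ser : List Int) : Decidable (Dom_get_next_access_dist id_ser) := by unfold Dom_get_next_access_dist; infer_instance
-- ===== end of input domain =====

-- B replaces A's reversed-deque scan + final list reverse by a single forward pass that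
-- patches the previous occurrence's slot in a preallocated [n]*n list (objective: simpler).

-- ===== PORT A =====
-- A: build reverse_data by appendleft (cons), scan it forward keeping last-seen index in a
-- dict and appending distances (sentinel len(id_ser)), then reverse the output list.
def get_next_access_dist (id_ser : List Int) : List Int :=
  ((PySem.List.enumerate (id_ser.foldl (fun acc req => req :: acc) [])).foldl
    (fun (st : List Int × PySem.Dict Int Int) p =>
      match st.2.get? p.2 with
      | some t => (st.1 ++ [p.1 - t], st.2.insert p.2 p.1)
      | none   => (st.1 ++ [(id_ser.length : Int)], st.2.insert p.2 p.1))
    ([], PySem.Dict.empty)).1.reverse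

-- ===== PORT B =====
-- B: the loop body 'if req in last: result[last[req]] = i - last[req]'
def pvPatch (last : PySem.Dict Int Int) (req i : Int) (res : List Int) : List Int :=
  match last.get? req with
  | some j => res.set j.toNat (i - j)
  | none => res

-- B: the 'for req in id_ser' loop with the running counter i, as structural recursion
def pvScan : List Int → Int → List Int → PySem.Dict Int Int → List Int
  | [], _, res, _ => res
  | req :: rest, i, res, last => pvScan rest (i + 1) (pvPatch last req i res) (last.insert req i)

-- B: result = [n]*n; forward pass, on a repeat write i - last[req] at slot last[req].
def get_next_access_dist_alt (id_ser : List Int) : List Int :=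
  pvScan id_ser 0 (List.replicate id_ser.length (id_ser.length : Int)) PySem.Dict.empty

-- ===== PRECONDITION & SPEC =====
def Spec_get_next_access_dist (id_ser : List Int) (out : List Int) : Prop := out = get_next_access_dist_alt id_ser
instance (id_ser : List Int) (out : List Int) : Decidable (Spec_get_next_access_dist id_ser out) := by unfold Spec_get_next_access_dist; infer_instance

-- ===== CLAIM (what is proved, stated in full; the proofs are below) =====
def Claim_equal_get_next_access_dist : Prop := ∀ (id_ser : List Int), Dom_get_next_access_dist id_ser → Spec_get_next_access_dist id_ser (get_next_access_dist id_ser)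

-- ===== LEMMAS AND PROOFS =====

-- index of the first occurrence of v
def firstIdx? (v : Int) : List Int → Option Nat
  | [] => none
  | y :: ys => if y = v then some 0 else (firstIdx? v ys).map (· + 1)

-- the common specification: distance from each position to the next occurrence of its
-- value, sentinel s for values that never recur
def specAux (s : Int) : List Int → List Int
  | [] => []
  | x :: xs =>
    (match firstIdx? x xs with
     | some k => (k : Int) + 1
     | none => s) :: specAux s xs

-- A-side pure recursions
def gA (s : Int) : List Int → Int → PySem.Dict Int Int → List Int
  | [], _, _ => []
  | y :: ys, i, d =>
    (match d.get? y with
     | some t => i - t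
     | none => s) :: gA s ys (i + 1) (d.insert y i)

def dA : List Int → Int → PySem.Dict Int Int → PySem.Dict Int Int
  | [], _, d => d
  | y :: ys, i, d => dA ys (i + 1) (d.insert y i)

-- index of the last occurrence of v
def lastIdx? (v : Int) : List Int → Option Nat
  | [] => none
  | y :: ys =>
    match lastIdx? v ys with
    | some j => some (j + 1)
    | none => if y = v then some 0 else none

theorem pvPatch_some {last : PySem.Dict Int Int} {y j : Int} (i : Int) (res : List Int)
    (h : last.get? y = some j) : pvPatch last y i res = res.set j.toNat (i - j) := by
  simp [pvPatch, h]

theorem pvPatch_none {last : PySem.Dict Int Int} {y : Int} (i : Int) (res : List Int)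
    (h : last.get? y = none) : pvPatch last y i res = res := by
  simp [pvPatch, h]

theorem foldl_cons_eq_reverse (xs acc : List Int) :
    xs.foldl (fun acc req => req :: acc) acc = xs.reverse ++ acc := by
  induction xs generalizing acc with
  | nil => simp
  | cons x xs ih => simp [List.foldl_cons, ih]

theorem foldlA_eq_gA (s : Int) (ys : List Int) (i : Int) (acc : List Int) (d : PySem.Dict Int Int) :
    (PySem.List.enumerate ys i).foldl
      (fun (st : List Int × PySem.Dict Int Int) p =>
        match st.2.get? p.2 with
        | some t => (st.1 ++ [p.1 - t], st.2.insert p.2 p.1)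
        | none   => (st.1 ++ [s], st.2.insert p.2 p.1)) (acc, d)
    = (acc ++ gA s ys i d, dA ys i d) := by
  induction ys generalizing i acc d with
  | nil => simp [gA, dA, PySem.List.enumerate_nil]
  | cons y ys ih =>
    rw [PySem.List.enumerate_cons]
    cases h : d.get? y with
    | some t => simp [List.foldl_cons, h, ih, gA, dA]
    | none => simp [List.foldl_cons, h, ih, gA, dA]

theorem gA_append (s : Int) (p q : List Int) (i : Int) (d : PySem.Dict Int Int) :
    gA s (p ++ q) i d = gA s p i d ++ gA s q (i + p.length) (dA p i d) := by
  induction p generalizing i d with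
  | nil => simp [gA, dA]
  | cons y ys ih =>
    simp only [List.cons_append, gA, dA, ih]
    have harith : i + 1 + (ys.length : Int) = i + ((y :: ys).length : Int) := by
      simp only [List.length_cons]; push_cast; ring
    rw [harith]

theorem dA_get (p : List Int) (i : Int) (d : PySem.Dict Int Int) (v : Int) :
    (dA p i d).get? v =
      match lastIdx? v p with
      | some j => some (i + j)
      | none => d.get? v := by
  induction p generalizing i d with
  | nil => simp [dA, lastIdx?]
  | cons y ys ih =>
    simp only [dA, lastIdx?, ih]
    cases h : lastIdx? v ys with
    | some j => simp [h]; push_cast; ring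
    | none =>
      simp only [h]
      rw [PySem.Dict.get?_insert]
      by_cases hv : v = y <;> simp [hv, eq_comm]

theorem lastIdx?_append (v : Int) (p q : List Int) :
    lastIdx? v (p ++ q) =
      match lastIdx? v q with
      | some j => some (p.length + j)
      | none => lastIdx? v p := by
  induction p with
  | nil => cases h : lastIdx? v q <;> simp [h, lastIdx?]
  | cons y ys ih =>
    simp only [List.cons_append, lastIdx?, ih]
    cases h : lastIdx? v q with
    | some j => simp [h]; omega
    | none => simp [h]

theorem firstIdx?_lt_length {v : Int} {xs : List Int} {k : Nat} (h : firstIdx? v xs = some k) :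
    k < xs.length := by
  induction xs generalizing k with
  | nil => simp [firstIdx?] at h
  | cons y ys ih =>
    by_cases hy : y = v
    · simp [firstIdx?, hy] at h; simp only [List.length_cons]; omega
    · simp only [firstIdx?, if_neg hy] at h
      cases hk : firstIdx? v ys with
      | none => rw [hk] at h; simp at h
      | some k' =>
        rw [hk] at h; simp at h
        have := ih hk
        simp; omega

theorem lastIdx?_reverse (x : Int) (xs : List Int) :
    lastIdx? x xs.reverse = (firstIdx? x xs).map (fun k => xs.length - 1 - k) := by
  induction xs with
  | nil => simp [lastIdx?, firstIdx?]
  | cons y ys ih =>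
    rw [List.reverse_cons, lastIdx?_append, ih]
    by_cases hy : y = x
    · subst hy
      simp [lastIdx?, firstIdx?]
    · have h1 : lastIdx? x [y] = none := by simp [lastIdx?, hy]
      rw [h1]
      have h2 : firstIdx? x (y :: ys) = (firstIdx? x ys).map (· + 1) := by
        simp [firstIdx?, hy]
      rw [h2]
      cases h : firstIdx? x ys with
      | none => simp [h]
      | some k =>
        have hk := firstIdx?_lt_length h
        simp [h]; omega

theorem gA_reverse_eq_specAux (s : Int) (xs : List Int) :
    (gA s xs.reverse 0 PySem.Dict.empty).reverse = specAux s xs := by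
  induction xs with
  | nil => simp [gA, specAux]
  | cons x xs ih =>
    rw [List.reverse_cons, gA_append]
    have hd : (dA xs.reverse 0 PySem.Dict.empty).get? x =
        match lastIdx? x xs.reverse with
        | some j => some ((j : Int))
        | none => none := by
      rw [dA_get]
      cases h : lastIdx? x xs.reverse <;> simp [PySem.Dict.get?_empty]
    rw [lastIdx?_reverse] at hd
    simp only [specAux]
    cases h : firstIdx? x xs with
    | none =>
      rw [h] at hd
      simp only [Option.map_none] at hd
      simp [gA, hd, List.reverse_append, ih]
    | some k =>
      have hk := firstIdx?_lt_length h
      rw [h] at hd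
      simp only [Option.map_some] at hd
      simp only [gA, hd, List.length_reverse, List.reverse_append, List.reverse_cons]
      simp [ih]
      omega

theorem set_append_singleton_ne (r : List Int) (c v : Int) (j : Nat) (hj : j ≠ r.length) :
    (r ++ [c]).set j v = r.set j v ++ [c] := by
  rcases Nat.lt_or_ge j r.length with h | h
  · rw [List.set_append_left _ _ h]
  · have h' : r.length < j := lt_of_le_of_ne h (Ne.symm hj)
    rw [List.set_eq_of_length_le (by simp; omega), List.set_eq_of_length_le (by omega)]

theorem set_append_singleton_self (r : List Int) (c v : Int) :
    (r ++ [c]).set r.length v = r ++ [v] := by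
  rw [List.set_append_right _ _ (le_refl _)]
  simp

theorem pvScan_nil_res (ys : List Int) (i : Int) (last : PySem.Dict Int Int) :
    pvScan ys i [] last = [] := by
  induction ys generalizing i last with
  | nil => rfl
  | cons y ys ih =>
    simp only [pvScan, pvPatch]
    cases h : last.get? y <;> simp [h, ih]

theorem pvScan_no_owner (ys : List Int) (i : Nat) (last : PySem.Dict Int Int)
    (r : List Int) (c : Int)
    (H : ∀ v j, last.get? v = some j → 0 ≤ j ∧ j ≠ (r.length : Int))
    (hi : r.length < i) :
    pvScan ys (i : Int) (r ++ [c]) last = pvScan ys (i : Int) r last ++ [c] := by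
  induction ys generalizing i last r with
  | nil => rfl
  | cons y ys ih =>
    simp only [pvScan]
    have hcast : ((i : Int) + 1) = ((i + 1 : Nat) : Int) := by push_cast; ring
    have Hnew : ∀ v j, (last.insert y (i : Int)).get? v = some j → 0 ≤ j ∧ j ≠ (r.length : Int) := by
      intro v j hvj
      rw [PySem.Dict.get?_insert] at hvj
      by_cases hv : v = y
      · simp [hv] at hvj; constructor <;> omega
      · rw [if_neg hv] at hvj; exact H v j hvj
    cases h : last.get? y with
    | none =>
      rw [pvPatch_none _ _ h, pvPatch_none _ _ h, hcast]
      exact ih (i + 1) _ r Hnew (by omega)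
    | some j =>
      obtain ⟨hj0, hjne⟩ := H y j h
      have hjt : j.toNat ≠ r.length := by omega
      rw [pvPatch_some _ _ h, pvPatch_some _ _ h,
        set_append_singleton_ne r c _ j.toNat hjt, hcast]
      have := ih (i + 1) (last.insert y (i : Int)) (r.set j.toNat ((i : Int) - j))
        (by simpa using Hnew) (by simp; omega)
      simpa using this

theorem pvScan_owner (ys : List Int) (i : Nat) (last : PySem.Dict Int Int)
    (r : List Int) (c v₀ : Int)
    (H1 : last.get? v₀ = some (r.length : Int))
    (H2 : ∀ v j, last.get? v = some j → 0 ≤ j ∧ (j = (r.length : Int) → v = v₀))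
    (hi : r.length < i) :
    pvScan ys (i : Int) (r ++ [c]) last =
      pvScan ys (i : Int) r last ++
        [match firstIdx? v₀ ys with
         | some k => ((i : Int) + k) - r.length
         | none => c] := by
  induction ys generalizing i last r with
  | nil => simp [pvScan, firstIdx?]
  | cons y ys ih =>
    have hcast : ((i : Int) + 1) = ((i + 1 : Nat) : Int) := by push_cast; ring
    by_cases hy : y = v₀
    · subst hy
      simp only [pvScan]
      rw [pvPatch_some _ _ H1, pvPatch_some _ _ H1]
      have htn : ((r.length : Int)).toNat = r.length := by omega
      rw [htn, set_append_singleton_self r c _,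
        List.set_eq_of_length_le (le_refl _)]
      have Hnew : ∀ v j, (last.insert y (i : Int)).get? v = some j →
          0 ≤ j ∧ j ≠ (r.length : Int) := by
        intro v j hvj
        rw [PySem.Dict.get?_insert] at hvj
        by_cases hv : v = y
        · simp [hv] at hvj; constructor <;> omega
        · rw [if_neg hv] at hvj
          obtain ⟨h0, himp⟩ := H2 v j hvj
          exact ⟨h0, fun hj => hv (himp hj)⟩
      rw [hcast, pvScan_no_owner ys (i + 1) _ r _ Hnew (by omega)]
      simp [firstIdx?]
    · simp only [pvScan]
      have Hnew1 : (last.insert y (i : Int)).get? v₀ = some (r.length : Int) := by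
        rw [PySem.Dict.get?_insert, if_neg (fun h => hy h.symm)]; exact H1
      have Hnew2 : ∀ v j, (last.insert y (i : Int)).get? v = some j →
          0 ≤ j ∧ (j = (r.length : Int) → v = v₀) := by
        intro v j hvj
        rw [PySem.Dict.get?_insert] at hvj
        by_cases hv : v = y
        · simp [hv] at hvj
          refine ⟨by omega, fun hj => absurd hj (by omega)⟩
        · rw [if_neg hv] at hvj; exact H2 v j hvj
      have hidx : firstIdx? v₀ (y :: ys) = (firstIdx? v₀ ys).map (· + 1) := by
        simp [firstIdx?, hy]
      cases h : last.get? y with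
      | none =>
        rw [pvPatch_none _ _ h, pvPatch_none _ _ h, hcast,
          ih (i + 1) _ r Hnew1 Hnew2 (by omega), hidx]
        cases hk : firstIdx? v₀ ys with
        | none => simp
        | some k => simp; push_cast; ring
      | some j =>
        obtain ⟨hj0, himp⟩ := H2 y j h
        have hjne : j ≠ (r.length : Int) := fun hj => hy (himp hj)
        have hjt : j.toNat ≠ r.length := by omega
        rw [pvPatch_some _ _ h, pvPatch_some _ _ h,
          set_append_singleton_ne r c _ j.toNat hjt, hcast]
        have := ih (i + 1) (last.insert y (i : Int)) (r.set j.toNat ((i : Int) - j))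
          (by simpa using Hnew1) (by simpa using Hnew2) (by simp; omega)
        rw [this, hidx]
        cases hk : firstIdx? v₀ ys with
        | none => simp
        | some k => simp; push_cast; ring

theorem pvScan_main (s : Int) (ys : List Int) (i : Nat) (res₁ : List Int)
    (last : PySem.Dict Int Int)
    (H : ∀ v j, last.get? v = some j → 0 ≤ j ∧ j < (i : Int))
    (hlen : res₁.length = i) :
    pvScan ys (i : Int) (res₁ ++ List.replicate ys.length s) last =
      pvScan ys (i : Int) res₁ last ++ specAux s ys := by
  induction ys generalizing i res₁ last with
  | nil => simp [pvScan, specAux]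
  | cons y ys ih =>
    have hcast : ((i : Int) + 1) = ((i + 1 : Nat) : Int) := by push_cast; ring
    simp only [pvScan, List.length_cons, List.replicate_succ]
    have Hnew : ∀ v j, (last.insert y (i : Int)).get? v = some j →
        0 ≤ j ∧ j < ((i + 1 : Nat) : Int) := by
      intro v j hvj
      rw [PySem.Dict.get?_insert] at hvj
      by_cases hv : v = y
      · simp [hv] at hvj; constructor <;> omega
      · rw [if_neg hv] at hvj
        obtain ⟨h0, hlt⟩ := H v j hvj
        constructor <;> push_cast <;> omega
    have Hown : ∀ (r : List Int), r.length = i →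
        (∀ v j, (last.insert y (i : Int)).get? v = some j →
          0 ≤ j ∧ (j = (r.length : Int) → v = y)) := by
      intro r hr v j hvj
      rw [PySem.Dict.get?_insert] at hvj
      by_cases hv : v = y
      · simp [hv] at hvj; exact ⟨by omega, fun _ => hv⟩
      · rw [if_neg hv] at hvj
        obtain ⟨h0, hlt⟩ := H v j hvj
        exact ⟨h0, fun hj => absurd hj (by rw [hr]; omega)⟩
    cases h : last.get? y with
    | none =>
      rw [pvPatch_none _ _ h, pvPatch_none _ _ h,
        show res₁ ++ s :: List.replicate ys.length s
           = (res₁ ++ [s]) ++ List.replicate ys.length s by simp, hcast,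
        ih (i + 1) (res₁ ++ [s]) _ Hnew (by simp [hlen]),
        pvScan_owner ys (i + 1) _ res₁ s y
          (by rw [PySem.Dict.get?_insert_self]; rw [hlen])
          (Hown res₁ hlen) (by omega)]
      simp only [specAux, List.append_assoc, List.singleton_append]
      congr 1
      congr 1
      cases hk : firstIdx? y ys with
      | none => simp
      | some k => simp [hlen]; push_cast; ring
    | some j =>
      obtain ⟨hj0, hjlt⟩ := H y j h
      have hjt : j.toNat < res₁.length := by omega
      rw [pvPatch_some _ _ h, pvPatch_some _ _ h,
        show res₁ ++ s :: List.replicate ys.length s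
           = (res₁ ++ [s]) ++ List.replicate ys.length s by simp,
        List.set_append_left _ _ (by simp; omega),
        List.set_append_left _ _ hjt, hcast,
        ih (i + 1) (res₁.set j.toNat ((i : Int) - j) ++ [s]) _ Hnew (by simp [hlen]),
        pvScan_owner ys (i + 1) _ (res₁.set j.toNat ((i : Int) - j)) s y
          (by rw [PySem.Dict.get?_insert_self]; simp [hlen])
          (by have := Hown (res₁.set j.toNat ((i : Int) - j)) (by simp [hlen])
              exact this)
          (by simp [hlen])]
      simp only [specAux, List.append_assoc, List.singleton_append]
      congr 1
      congr 1
      cases hk : firstIdx? y ys with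
      | none => simp
      | some k => simp [hlen]; push_cast; ring

theorem portA_eq_specAux (xs : List Int) :
    get_next_access_dist xs = specAux (xs.length : Int) xs := by
  unfold get_next_access_dist
  rw [foldl_cons_eq_reverse, List.append_nil, foldlA_eq_gA]
  exact gA_reverse_eq_specAux _ xs

theorem portB_eq_specAux (xs : List Int) :
    get_next_access_dist_alt xs = specAux (xs.length : Int) xs := by
  unfold get_next_access_dist_alt
  have := pvScan_main (xs.length : Int) xs 0 [] PySem.Dict.empty
    (by intro v j hvj; rw [PySem.Dict.get?_empty] at hvj; cases hvj) rfl
  simp only [Nat.cast_zero, List.nil_append] at this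
  rw [this, pvScan_nil_res]
  exact List.nil_append _

-- ===== VERDICT (by name: the statement is the Claim_ definition above) =====
theorem get_next_access_dist_spec : Claim_equal_get_next_access_dist := by
  intro id_ser _
  unfold Spec_get_next_access_dist
  rw [portA_eq_specAux, portB_eq_specAux]
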